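-- pv_equiv track=rewrite | github.com/avg16/cp-dsa | codeforces/normal_problem.py | solve
-- ===== SOURCE A (Python) =====
-- def solve(str_input):
--     str_list = list(str_input)
--     for i in range(len(str_list)):
--         if str_list[i] == 'p':
--             str_list[i] = 'q'
--         elif str_list[i] == 'q':
--             str_list[i] = 'p'
--         str_list = list(reversed(str_list))
--     return "".join(str_list)
-- ===== SOURCE B (Python) =====
-- def solve(str_input):
--     n = len(str_input)
--     arr = list(str_input)
--     for i in range(n):
--         # after i reversals, the current front-to-back view maps position i
--         # to underlying index i (even parity) or n-1-i (odd parity)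
--         j = i if i % 2 == 0 else n - 1 - i
--         c = arr[j]
--         if c == 'p':
--             arr[j] = 'q'
--         elif c == 'q':
--             arr[j] = 'p'
--     if n % 2 == 1:
--         arr.reverse()
--     return "".join(arr)
-- ===== Notes on version B (the rewrite author's own statement) =====
-- stated objective: faster
-- what changed: Instead of physically reversing the whole list after every step (O(n) per step), B tracks the orientation parity and maps each step i to its underlying index (i if i is even, n-1-i if odd), swapping in place and reversing once at the end if n is odd.
import Mathlib
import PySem

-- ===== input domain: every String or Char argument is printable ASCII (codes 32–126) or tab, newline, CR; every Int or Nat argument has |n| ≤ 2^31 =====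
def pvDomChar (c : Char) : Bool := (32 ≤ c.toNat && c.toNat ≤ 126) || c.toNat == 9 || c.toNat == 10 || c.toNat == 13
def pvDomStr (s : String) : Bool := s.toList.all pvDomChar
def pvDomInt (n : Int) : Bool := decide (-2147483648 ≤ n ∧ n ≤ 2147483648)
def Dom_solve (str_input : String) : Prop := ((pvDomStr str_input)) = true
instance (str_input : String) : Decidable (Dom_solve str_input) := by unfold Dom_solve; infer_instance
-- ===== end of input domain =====

-- B replaces A's reverse-per-step O(n^2) loop by tracking the orientation parity
-- and touching each underlying index once (objective: faster, asymptotic).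

-- shared helper: the p/q swap applied to one character (A's if/elif chain)
def pvSwapPQ (c : Char) : Char := if c = 'p' then 'q' else if c = 'q' then 'p' else c

-- ===== PORT A =====
def solve (str_input : String) : String :=
  let str_list := str_input.toList
  let str_list := (List.range str_list.length).foldl
    (fun acc i => (acc.set i (pvSwapPQ (acc.getD i ' '))).reverse) str_list
  String.ofList str_list

-- ===== PORT B =====
def solve_alt (str_input : String) : String :=
  let n := str_input.toList.length
  let arr := (List.range n).foldl
    (fun arr i =>
      let j := if i % 2 == 0 then i else n - 1 - i
      arr.set j (pvSwapPQ (arr.getD j ' '))) str_input.toList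
  String.ofList (if n % 2 == 1 then arr.reverse else arr)

-- ===== PRECONDITION & SPEC =====
def Spec_solve (str_input : String) (out : String) : Prop := out = solve_alt str_input
instance (str_input : String) (out : String) : Decidable (Spec_solve str_input out) := by unfold Spec_solve; infer_instance

-- ===== CLAIM (what is proved, stated in full; the proofs are below) =====
def Claim_equal_solve : Prop := ∀ (str_input : String), Dom_solve str_input → Spec_solve str_input (solve str_input)

-- ===== LEMMAS AND PROOFS =====

theorem pv_set_reverse (l : List Char) (k : Nat) (c : Char) (hk : k < l.length) :
    l.reverse.set k c = (l.set (l.length - 1 - k) c).reverse := by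
  apply List.ext_getElem
  · simp
  · intro i h1 h2
    simp only [List.length_reverse, List.length_set] at h1 h2
    simp only [List.getElem_reverse, List.getElem_set, List.length_set]
    by_cases h : k = i
    · subst h; simp
    · rw [if_neg h, if_neg (by omega)]

theorem pv_foldlB_len (n : Nat) (l : List Char) (ks : List Nat) :
    (ks.foldl (fun arr i =>
       let j := if i % 2 == 0 then i else n - 1 - i
       arr.set j (pvSwapPQ (arr.getD j ' '))) l).length = l.length := by
  induction ks generalizing l with
  | nil => rfl
  | cons k ks ih => rw [List.foldl_cons, ih]; simp

-- invariant: after processing range k, A's list is B's array, reversed iff k is odd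
theorem pv_invariant (l : List Char) (k : Nat) (hk : k ≤ l.length) :
    (List.range k).foldl (fun acc i => (acc.set i (pvSwapPQ (acc.getD i ' '))).reverse) l
      = (if k % 2 = 1 then
          ((List.range k).foldl (fun arr i =>
            let j := if i % 2 == 0 then i else l.length - 1 - i
            arr.set j (pvSwapPQ (arr.getD j ' '))) l).reverse
        else
          (List.range k).foldl (fun arr i =>
            let j := if i % 2 == 0 then i else l.length - 1 - i
            arr.set j (pvSwapPQ (arr.getD j ' '))) l) := by
  induction k with
  | zero => simp
  | succ k ih =>
    have hk' : k ≤ l.length := Nat.le_of_succ_le hk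
    have hklt : k < l.length := hk
    rw [List.range_succ, List.foldl_append, List.foldl_append, ih hk']
    simp only [List.foldl_cons, List.foldl_nil]
    set B := (List.range k).foldl (fun arr i =>
        let j := if i % 2 == 0 then i else l.length - 1 - i
        arr.set j (pvSwapPQ (arr.getD j ' '))) l with hB
    have hBlen : B.length = l.length := pv_foldlB_len l.length l (List.range k)
    by_cases hpar : k % 2 = 1
    · -- k odd: A's current list is B.reverse; view index k is underlying index n-1-k
      have hj : (if (k % 2 == 0) = true then k else l.length - 1 - k)
          = l.length - 1 - k := by simp [hpar]
      rw [if_pos hpar, if_neg (by omega : ¬ (k + 1) % 2 = 1), hj]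
      have hget : B.reverse.getD k ' ' = B.getD (l.length - 1 - k) ' ' := by
        rw [List.getD_eq_getElem _ _ (by simp [hBlen]; omega : k < B.reverse.length),
            List.getD_eq_getElem _ _ (by omega : l.length - 1 - k < B.length),
            List.getElem_reverse]
        congr 1; omega
      rw [hget, pv_set_reverse B k _ (by omega), List.reverse_reverse]
      have h2 : B.length - 1 - k = l.length - 1 - k := by omega
      rw [h2]
    · -- k even: current view is B itself
      have hke : k % 2 = 0 := by omega
      have hj : (if (k % 2 == 0) = true then k else l.length - 1 - k) = k := by
        simp [hke]
      rw [if_neg hpar, if_pos (by omega : (k + 1) % 2 = 1), hj]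

theorem solve_eq (s : String) : solve s = solve_alt s := by
  unfold solve solve_alt
  simp only []
  rw [pv_invariant s.toList s.toList.length (le_refl _)]
  by_cases h : s.toList.length % 2 = 1
  · have h' : s.length % 2 = 1 := by rw [← String.length_toList]; exact h
    rw [if_pos h, if_pos (by simp [h'] : (s.toList.length % 2 == 1) = true)]
  · have h' : ¬ s.length % 2 = 1 := by rw [← String.length_toList]; exact h
    rw [if_neg h, if_neg (by simp [String.length_toList]; omega : ¬ (s.toList.length % 2 == 1) = true)]

-- ===== VERDICT (by name: the statement is the Claim_ definition above) =====
theorem solve_spec : Claim_equal_solve := by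
  intro s _
  unfold Spec_solve
  exact solve_eq s
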